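-- pv_equiv track=rewrite | github.com/L3viathan/veronique | db.py | make_search_key
-- ===== SOURCE A (Python) =====
-- import unicodedata
--
-- def make_search_key(name):
--     word = []
--     words = []
--     for char in unicodedata.normalize("NFKD", name):
--         cat = unicodedata.category(char)[0]
--         if cat == "L":  # letters
--             word.append(char)
--         elif cat in "ZP" and word:
--             # whitespace, punctuation
--             words.append("".join(word))
--             word = []
--         elif cat == "M":
--             # modifier: ignore
--             continue
--     if word:
--         words.append("".join(word))
--     return " ".join(words).casefold()
-- ===== SOURCE B (Python) =====
-- import unicodedata
--
-- def make_search_key(name):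
--     def clean(char):
--         cat = unicodedata.category(char)[0]
--         if cat == "L":      # letters: keep
--             return char
--         if cat in "ZP":     # whitespace, punctuation: word boundary
--             return " "
--         return ""           # marks, digits, symbols, controls: drop
--     cleaned = "".join(clean(c) for c in unicodedata.normalize("NFKD", name))
--     return " ".join(cleaned.split()).casefold()
-- ===== Notes on version B (the rewrite author's own statement) =====
-- stated objective: simpler
-- what changed: Replaces the stateful word/words accumulation with a manual flush by a stateless per-char map (keep a letter, turn a separator into a space, drop the rest) followed by str.split(), delegating word segmentation to the standard library.
import Mathlib
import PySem

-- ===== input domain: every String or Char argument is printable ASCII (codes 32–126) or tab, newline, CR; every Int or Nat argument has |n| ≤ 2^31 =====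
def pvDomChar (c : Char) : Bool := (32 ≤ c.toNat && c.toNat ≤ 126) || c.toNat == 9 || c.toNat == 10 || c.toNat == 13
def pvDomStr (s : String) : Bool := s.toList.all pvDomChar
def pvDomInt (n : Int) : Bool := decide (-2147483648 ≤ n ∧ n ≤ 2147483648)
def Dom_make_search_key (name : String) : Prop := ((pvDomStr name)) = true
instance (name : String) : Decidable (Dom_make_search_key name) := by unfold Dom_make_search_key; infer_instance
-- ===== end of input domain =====

-- B replaces A's stateful word/words accumulation and manual flush by a stateless per-char
-- map to ''/char/' ' followed by str.split(); equivalence of return values is proved on Dom.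

-- Exact on the ASCII domain: unicodedata.normalize("NFKD", ·) is the identity, and the
-- first letter of unicodedata.category is 'L' exactly for the letters (isalpha) and in
-- "ZP" exactly for ' ' and the ASCII punctuation below (digits are N, symbols S, tab/LF/CR Cc).
def pvCatL (c : Char) : Bool := PySem.Chars.isalpha c

def pvCatZP (c : Char) : Bool :=
  c == ' ' || ['!', '"', '#', '%', '&', '\'', '(', ')', '*', ',', '-', '.', '/',
               ':', ';', '?', '@', '[', '\\', ']', '_', '{', '}'].contains c

-- ===== PORT A =====
-- one iteration of A's for-loop over (word, words); the elif 'M: continue' and the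
-- implicit fall-through both leave the state unchanged (the final else branch)
def pvAStep (st : List Char × List (List Char)) (c : Char) : List Char × List (List Char) :=
  if pvCatL c then (st.1 ++ [c], st.2)
  else if pvCatZP c && !st.1.isEmpty then ([], st.2 ++ [st.1])
  else st

def make_search_key (name : String) : String :=
  let r := name.toList.foldl pvAStep ([], [])
  let words := if r.1.isEmpty then r.2 else r.2 ++ [r.1]
  -- " ".join(words).casefold(); casefold = lower on the ASCII domain
  String.ofList (PySem.Chars.lower (PySem.Chars.join [' '] words))

-- ===== PORT B =====
-- B's clean(char): keep a letter, map ZP to a space, drop everything else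
def pvClean (c : Char) : List Char :=
  if pvCatL c then [c] else if pvCatZP c then [' '] else []

def make_search_key_alt (name : String) : String :=
  let cleaned := name.toList.flatMap pvClean    -- "".join(clean(c) for c in …)
  -- " ".join(cleaned.split()).casefold(); casefold = lower on the ASCII domain
  String.ofList (PySem.Chars.lower (PySem.Chars.join [' '] (PySem.Chars.split₀ cleaned)))

-- ===== PRECONDITION & SPEC =====
def Spec_make_search_key (name : String) (out : String) : Prop := out = make_search_key_alt name
instance (name : String) (out : String) : Decidable (Spec_make_search_key name out) := by unfold Spec_make_search_key; infer_instance

-- ===== CLAIM (what is proved, stated in full; the proofs are below) =====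
def Claim_equal_make_search_key : Prop := ∀ (name : String), Dom_make_search_key name → Spec_make_search_key name (make_search_key name)

-- ===== LEMMAS AND PROOFS =====

theorem pvNotSpace_of_catL {c : Char} (h : pvCatL c = true) : PySem.Chars.isspace c = false := by
  simp only [pvCatL, PySem.Chars.isalpha, PySem.Chars.isupper, PySem.Chars.islower,
    Bool.or_eq_true, Bool.and_eq_true, decide_eq_true_eq] at h
  simp only [PySem.Chars.isspace, Bool.or_eq_false_iff, Bool.and_eq_false_iff,
    decide_eq_false_iff_not]
  simp only [Char.le_def, UInt32.le_iff_toNat_le, Char.toNat_val,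
    show ('A').toNat = 65 from rfl, show ('Z').toNat = 90 from rfl,
    show ('a').toNat = 97 from rfl, show ('z').toNat = 122 from rfl] at h
  omega

theorem pvGo_nil (cur : List Char) (acc : List (List Char)) :
    PySem.Chars.split₀.go [] cur acc =
      if cur.isEmpty then acc.reverse else (cur.reverse :: acc).reverse := rfl

theorem pvGo_cons (c : Char) (rest cur : List Char) (acc : List (List Char)) :
    PySem.Chars.split₀.go (c :: rest) cur acc =
      if PySem.Chars.isspace c then
        (if cur.isEmpty then PySem.Chars.split₀.go rest [] acc
         else PySem.Chars.split₀.go rest [] (cur.reverse :: acc))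
      else PySem.Chars.split₀.go rest (c :: cur) acc := rfl

theorem pvGo_acc (s : List Char) (cur : List Char) (acc : List (List Char)) :
    PySem.Chars.split₀.go s cur acc = acc.reverse ++ PySem.Chars.split₀.go s cur [] := by
  induction s generalizing cur acc with
  | nil => by_cases h : cur.isEmpty <;> simp [pvGo_nil, h]
  | cons c rest ih =>
    rw [pvGo_cons, pvGo_cons]
    by_cases hs : PySem.Chars.isspace c
    · by_cases hc : cur.isEmpty
      · simpa [hs, hc] using ih [] acc
      · simp only [hs, hc, if_true, if_false, Bool.false_eq_true]
        rw [ih _ (cur.reverse :: acc), ih _ [cur.reverse]]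
        simp
    · simpa [hs] using ih (c :: cur) acc

-- A's final flush of the pending word
def pvFinish (r : List Char × List (List Char)) : List (List Char) :=
  if r.1.isEmpty then r.2 else r.2 ++ [r.1]

-- main invariant: A's loop from current word w (all letters) and emitted words ws,
-- followed by the final flush, equals ws ++ split₀ of B's cleaned tail continued from w
theorem pvMain (cs : List Char) (w : List Char) (ws : List (List Char))
    (hw : ∀ c ∈ w, pvCatL c = true) :
    pvFinish (cs.foldl pvAStep (w, ws)) =
      ws ++ PySem.Chars.split₀.go (cs.flatMap pvClean) w.reverse [] := by
  induction cs generalizing w ws with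
  | nil =>
    by_cases h : w.isEmpty
    · simp_all [pvFinish, pvGo_nil]
    · simp [pvFinish, pvGo_nil, h]
  | cons c rest ih =>
    simp only [List.foldl_cons, List.flatMap_cons, pvAStep, pvClean]
    by_cases hL : pvCatL c
    · have hw' : ∀ x ∈ w ++ [c], pvCatL x = true := by
        intro x hx
        rcases List.mem_append.1 hx with h | h
        · exact hw x h
        · simp at h; simpa [h] using hL
      rw [if_pos hL, if_pos hL, ih (w ++ [c]) ws hw']
      rw [List.singleton_append, pvGo_cons, if_neg (by simp [pvNotSpace_of_catL hL])]
      simp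
    · rw [if_neg hL, if_neg hL]
      by_cases hZ : pvCatZP c
      · by_cases hwe : w.isEmpty
        · have hwnil : w = [] := by simpa [List.isEmpty_iff] using hwe
          rw [if_neg (by simp [hwe]), if_pos hZ, ih w ws hw]
          rw [List.singleton_append, pvGo_cons]
          simp [PySem.Chars.isspace, hwnil]
        · rw [if_pos (by simp [hZ, hwe]), if_pos hZ, ih [] (ws ++ [w]) (by simp)]
          rw [List.singleton_append, pvGo_cons]
          rw [if_pos (show PySem.Chars.isspace ' ' = true from rfl),
              if_neg (by simpa using hwe)]
          rw [pvGo_acc _ _ [w.reverse.reverse]]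
          simp
      · rw [if_neg (by simp [hZ]), if_neg hZ, ih w ws hw]
        simp
-- ===== VERDICT (by name: the statement is the Claim_ definition above) =====
theorem make_search_key_spec : Claim_equal_make_search_key := by
  intro name _
  unfold Spec_make_search_key make_search_key make_search_key_alt
  simp only []
  have h := pvMain name.toList [] [] (by simp)
  simp only [pvFinish] at h
  rw [h]
  rfl
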